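-- pv_equiv track=rewrite | github.com/AutomatedProcessImprovement/pix-framework | src/pix_framework/discovery/gateway_conditions/rules_postprocessing.py | simplify_rule
-- ===== SOURCE A (Python) =====
-- def simplify_rule(rules):
--     grouped_conditions = {}
--     for attr, op, value in rules:
--         if attr not in grouped_conditions:
--             grouped_conditions[attr] = {'=': set(), '>': [], '<=': []}
--         if op == '=':
--             grouped_conditions[attr]['='].add(value)
--         else:
--             grouped_conditions[attr][op].append(value)
--
--     simplified_conditions = []
--     for attr, ops_values in grouped_conditions.items():
--         for value in ops_values['=']:
--             simplified_conditions.append((attr, '=', value))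
--         if ops_values['>']:
--             max_greater_than = max(ops_values['>'])
--             simplified_conditions.append((attr, '>', max_greater_than))
--         if ops_values['<=']:
--             min_less_than_or_equal = min(ops_values['<='])
--             simplified_conditions.append((attr, '<=', min_less_than_or_equal))
--
--     return simplified_conditions
-- ===== SOURCE B (Python) =====
-- def simplify_rule(rules):
--     # Three parallel dictionaries (dedup '=' values, running '>' max, running '<=' min)
--     # plus an explicit first-seen attr order list; the result is one comprehension,
--     # no per-attr value lists and no max()/min() calls.
--     order = []
--     eq, gt, le = {}, {}, {}
--     for attr, op, value in rules:
--         if attr not in eq: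
--             order.append(attr)
--             eq[attr] = []
--         if op == '=':
--             if value not in eq[attr]:
--                 eq[attr].append(value)
--         else:
--             d = {'>': gt, '<=': le}[op]  # unknown op: KeyError
--             if attr not in d or (value > d[attr] if op == '>' else value < d[attr]):
--                 d[attr] = value
--     return [t for attr in order
--               for t in [(attr, '=', v) for v in eq[attr]]
--                        + ([(attr, '>', gt[attr])] if attr in gt else [])
--                        + ([(attr, '<=', le[attr])] if attr in le else [])]
-- ===== Notes on version B (the rewrite author's own statement) =====
-- stated objective: alternative
-- what changed: B replaces A's single dict of per-attribute value collections and the second-pass max()/min() calls by three parallel dicts holding a dedup '=' list and running '>' max / '<=' min scalars plus an explicit first-seen order list, emitting the result as one comprehension; Pre_ excludes rules with an op outside {'=','>','<='} (A raises KeyError) and attrs with two distinct '=' values, where A's output order follows CPython's int-set hash order, which is accidental.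
import Mathlib
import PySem

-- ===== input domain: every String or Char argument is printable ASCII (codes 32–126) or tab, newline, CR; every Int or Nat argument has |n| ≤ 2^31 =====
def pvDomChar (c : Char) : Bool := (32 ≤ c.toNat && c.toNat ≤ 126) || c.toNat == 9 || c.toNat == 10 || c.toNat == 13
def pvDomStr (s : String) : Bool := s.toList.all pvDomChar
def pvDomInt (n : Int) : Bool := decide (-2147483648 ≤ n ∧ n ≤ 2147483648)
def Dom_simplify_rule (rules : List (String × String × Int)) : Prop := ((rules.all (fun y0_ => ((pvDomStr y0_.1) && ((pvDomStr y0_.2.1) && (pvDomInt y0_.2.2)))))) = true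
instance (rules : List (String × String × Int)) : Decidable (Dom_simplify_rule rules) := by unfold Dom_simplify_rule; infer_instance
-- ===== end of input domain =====

-- B replaces A's single dict of per-attribute value collections + second-pass max()/min()
-- by three parallel dicts (dedup '=' list, running '>' max, running '<=' min) with an
-- explicit first-seen order list, emitting via one flatMap (objective: alternative).


-- ===== PORT A =====
-- per-attr state: ('=' set, '>' value list, '<=' value list)
def pvInitA : PySem.Set Int × List Int × List Int := (PySem.Set.empty, [], [])

-- the body of A's op-branch on one entry; an op outside {'=','>','<='} raises KeyError in
-- Python (excluded by Pre_), ported as "leave the entry unchanged"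
def pvFA (op : String) (v : Int) (t : PySem.Set Int × List Int × List Int) :
    PySem.Set Int × List Int × List Int :=
  if op = "=" then (PySem.Set.add t.1 v, t.2.1, t.2.2)
  else if op = ">" then (t.1, t.2.1 ++ [v], t.2.2)
  else if op = "<=" then (t.1, t.2.1, t.2.2 ++ [v])
  else t

-- one iteration of A's grouping loop
def pvStepA (d : PySem.Dict String (PySem.Set Int × List Int × List Int))
    (r : String × String × Int) : PySem.Dict String (PySem.Set Int × List Int × List Int) :=
  match r with
  | (attr, op, v) =>
    let d1 := if d.contains attr then d else d.insert attr pvInitA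
    d1.modify attr pvInitA (pvFA op v)

-- one iteration of A's emission loop; "if lst: max(lst)" is the match on PySem.List.max?,
-- which is none exactly when the list is empty (and dually for min?)
def pvEmitA (acc : List (String × String × Int))
    (it : String × (PySem.Set Int × List Int × List Int)) : List (String × String × Int) :=
  let acc1 := it.2.1.foldl (fun a v => a ++ [(it.1, "=", v)]) acc
  let acc2 := match PySem.List.max? it.2.2.1 (fun x => x) with
    | some m => acc1 ++ [(it.1, ">", m)]
    | none => acc1
  match PySem.List.min? it.2.2.2 (fun x => x) with
  | some m => acc2 ++ [(it.1, "<=", m)]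
  | none => acc2

def simplify_rule (rules : List (String × String × Int)) : List (String × String × Int) :=
  ((rules.foldl pvStepA PySem.Dict.empty).items).foldl pvEmitA []

-- ===== PORT B =====
-- B's running state: (first-seen attr order list, '=' dedup-list dict, running-'>'-max dict,
-- running-'<='-min dict); "if value not in eq[attr]: append" is PySem.Set.add; the
-- {'>': gt, '<=': le}[op] dispatch is the op if-chain (an unknown op raises KeyError in
-- Python, excluded by Pre_, ported as "leave the state unchanged")
def pvStepB
    (st : List String × PySem.Dict String (PySem.Set Int) × PySem.Dict String Int × PySem.Dict String Int)
    (r : String × String × Int) :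
    List String × PySem.Dict String (PySem.Set Int) × PySem.Dict String Int × PySem.Dict String Int :=
  match r with
  | (attr, op, v) =>
    let order := if st.2.1.contains attr then st.1 else st.1 ++ [attr]
    let eq0 := if st.2.1.contains attr then st.2.1 else st.2.1.insert attr PySem.Set.empty
    if op = "=" then
      (order, eq0.modify attr PySem.Set.empty (fun s => PySem.Set.add s v), st.2.2.1, st.2.2.2)
    else if op = ">" then
      (order, eq0,
       (if !st.2.2.1.contains attr || st.2.2.1.getD attr 0 < v then st.2.2.1.insert attr v
        else st.2.2.1), st.2.2.2)
    else if op = "<=" then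
      (order, eq0, st.2.2.1,
       (if !st.2.2.2.contains attr || v < st.2.2.2.getD attr 0 then st.2.2.2.insert attr v
        else st.2.2.2))
    else (order, eq0, st.2.2.1, st.2.2.2)

-- the final comprehension: one block of tuples per attr in first-seen order
def simplify_rule_alt (rules : List (String × String × Int)) : List (String × String × Int) :=
  let st := rules.foldl pvStepB ([], PySem.Dict.empty, PySem.Dict.empty, PySem.Dict.empty)
  st.1.flatMap (fun attr =>
    (st.2.1.getD attr PySem.Set.empty).map (fun v => (attr, "=", v))
    ++ (if st.2.2.1.contains attr then [(attr, ">", st.2.2.1.getD attr 0)] else [])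
    ++ (if st.2.2.2.contains attr then [(attr, "<=", st.2.2.2.getD attr 0)] else []))

-- ===== PRECONDITION & SPEC =====
-- Pre_ excludes rules whose op is outside {'=','>','<='} (A raises KeyError there) and inputs
-- giving some attr two distinct '=' values, where A's output order is CPython's accidental
-- int-set hash order (B uses first-seen order there).
def Pre_simplify_rule (rules : List (String × String × Int)) : Prop :=
  (∀ r ∈ rules, r.2.1 = "=" ∨ r.2.1 = ">" ∨ r.2.1 = "<=") ∧
  (∀ r ∈ rules, ∀ r' ∈ rules, r.2.1 = "=" → r'.2.1 = "=" → r.1 = r'.1 → r.2.2 = r'.2.2)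
instance (rules : List (String × String × Int)) : Decidable (Pre_simplify_rule rules) := by
  unfold Pre_simplify_rule; infer_instance

def pvWitness_simplify_rule : (List (String × String × Int)) :=
  [("a", "=", 2), ("a", ">", 5), ("a", ">", 7), ("b", "<=", 3), ("b", "<=", 1)]

def Spec_simplify_rule (rules : List (String × String × Int)) (out : List (String × String × Int)) : Prop := out = simplify_rule_alt rules
instance (rules : List (String × String × Int)) (out : List (String × String × Int)) : Decidable (Spec_simplify_rule rules out) := by unfold Spec_simplify_rule; infer_instance

-- ===== CLAIM (what is proved, stated in full; the proofs are below) =====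
def Claim_equal_simplify_rule : Prop := ∀ (rules : List (String × String × Int)), Dom_simplify_rule rules → Pre_simplify_rule rules → Spec_simplify_rule rules (simplify_rule rules)

-- ===== LEMMAS AND PROOFS =====

-- the relational invariant: B's four components are pointwise views of A's dict
def pvRel (d : PySem.Dict String (PySem.Set Int × List Int × List Int))
    (st : List String × PySem.Dict String (PySem.Set Int) × PySem.Dict String Int × PySem.Dict String Int) : Prop :=
  st.1 = d.keys ∧ d.keys.Nodup ∧
  (∀ k, st.2.1.get? k = (d.get? k).map (·.1)) ∧
  (∀ k, st.2.2.1.get? k = (d.get? k).bind (fun t => PySem.List.max? t.2.1 (fun x => x))) ∧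
  (∀ k, st.2.2.2.get? k = (d.get? k).bind (fun t => PySem.List.min? t.2.2 (fun x => x)))

theorem pv_max?_snoc (xs : List Int) (v : Int) :
    PySem.List.max? (xs ++ [v]) (fun x => x) =
      some (match PySem.List.max? xs (fun x => x) with
            | none => v
            | some m => if m < v then v else m) := by
  cases h : PySem.List.max? xs (fun x => x) with
  | none =>
    simp only [PySem.List.max?] at h ⊢
    rw [List.foldl_append, h]
    rfl
  | some m =>
    simp only [PySem.List.max?] at h ⊢
    rw [List.foldl_append, h]
    simp only [List.foldl_cons, List.foldl_nil]
    split <;> rfl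

theorem pv_min?_snoc (xs : List Int) (v : Int) :
    PySem.List.min? (xs ++ [v]) (fun x => x) =
      some (match PySem.List.min? xs (fun x => x) with
            | none => v
            | some m => if v < m then v else m) := by
  cases h : PySem.List.min? xs (fun x => x) with
  | none =>
    simp only [PySem.List.min?] at h ⊢
    rw [List.foldl_append, h]
    rfl
  | some m =>
    simp only [PySem.List.min?] at h ⊢
    rw [List.foldl_append, h]
    simp only [List.foldl_cons, List.foldl_nil]
    split <;> rfl

theorem pv_stepA_get?_self (d : PySem.Dict String (PySem.Set Int × List Int × List Int))
    (attr op : String) (v : Int) :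
    (pvStepA d (attr, op, v)).get? attr = some (pvFA op v (d.getD attr pvInitA)) := by
  simp only [pvStepA, PySem.Dict.modify]
  by_cases h : d.contains attr = true
  · simp [h, PySem.Dict.get?_insert_self]
  · simp [h, PySem.Dict.get?_insert_self, PySem.Dict.getD_insert_self,
      PySem.Dict.getD_of_not_contains _ _ (by simpa using h)]

theorem pv_stepA_get?_ne (d : PySem.Dict String (PySem.Set Int × List Int × List Int))
    (attr op : String) (v : Int) (k : String) (hk : k ≠ attr) :
    (pvStepA d (attr, op, v)).get? k = d.get? k := by
  simp only [pvStepA, PySem.Dict.modify]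
  by_cases h : d.contains attr = true
  · simp [h, PySem.Dict.get?_insert_of_ne _ _ hk]
  · simp [h, PySem.Dict.get?_insert_of_ne _ _ hk]

theorem pv_stepA_keys (d : PySem.Dict String (PySem.Set Int × List Int × List Int))
    (attr op : String) (v : Int) :
    (pvStepA d (attr, op, v)).keys = if d.contains attr then d.keys else d.keys ++ [attr] := by
  simp only [pvStepA, PySem.Dict.modify]
  by_cases h : d.contains attr = true
  · simp [h, PySem.Dict.keys_insert_of_contains _ _ h]
  · simp [h, PySem.Dict.keys_insert_of_contains _ _ (PySem.Dict.contains_insert_self ..),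
      PySem.Dict.keys_insert_of_not_contains _ _ (by simpa using h)]

theorem pv_rel_step (d : PySem.Dict String (PySem.Set Int × List Int × List Int))
    (st : List String × PySem.Dict String (PySem.Set Int) × PySem.Dict String Int × PySem.Dict String Int)
    (r : String × String × Int) (h : pvRel d st) : pvRel (pvStepA d r) (pvStepB st r) := by
  obtain ⟨attr, op, v⟩ := r
  obtain ⟨h1, h2, h3, h4, h5⟩ := h
  have hc : st.2.1.contains attr = d.contains attr := by
    rw [PySem.Dict.contains_eq_isSome_get?, PySem.Dict.contains_eq_isSome_get?, h3]
    cases d.get? attr <;> rfl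
  have hkeys := pv_stepA_keys d attr op v
  have hnodup : (pvStepA d (attr, op, v)).keys.Nodup := by
    rw [hkeys]
    by_cases hct : d.contains attr = true
    · simpa [hct] using h2
    · have hnm : attr ∉ d.keys := fun hm => hct ((PySem.Dict.contains_iff_mem_keys ..).mpr hm)
      simp [hct, List.nodup_append, h2]
      exact fun a ha e => hnm (e ▸ ha)
  have horder : (if st.2.1.contains attr then st.1 else st.1 ++ [attr]) =
      (pvStepA d (attr, op, v)).keys := by
    rw [hkeys, hc, h1]
  have hbase1 :
      (if st.2.1.contains attr then st.2.1 else st.2.1.insert attr PySem.Set.empty).getD attr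
        PySem.Set.empty = (d.getD attr pvInitA).1 := by
    by_cases hct : d.contains attr = true
    · have hsm := (PySem.Dict.contains_eq_isSome_get? d attr) ▸ hct
      cases hg : d.get? attr with
      | none => rw [hg] at hsm; simp at hsm
      | some t =>
        rw [PySem.Dict.getD_of_get?_eq_some _ _ hg]
        simp [hc, hct, PySem.Dict.getD_eq_get?_getD, h3, hg]
    · simp [hc, hct, PySem.Dict.getD_insert_self,
        PySem.Dict.getD_of_not_contains _ _ (by simpa using hct), pvInitA, PySem.Set.empty]
  have hgself :
      (if st.2.1.contains attr then st.2.1 else st.2.1.insert attr PySem.Set.empty).get? attr =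
        some (d.getD attr pvInitA).1 := by
    by_cases hct : d.contains attr = true
    · have hsm := (PySem.Dict.contains_eq_isSome_get? d attr) ▸ hct
      cases hg : d.get? attr with
      | none => rw [hg] at hsm; simp at hsm
      | some t => rw [PySem.Dict.getD_of_get?_eq_some _ _ hg]; simp [hc, hct, h3, hg]
    · simp [hc, hct, PySem.Dict.get?_insert_self,
        PySem.Dict.getD_of_not_contains _ _ (by simpa using hct), pvInitA, PySem.Set.empty]
  have hbase2 : st.2.2.1.get? attr = PySem.List.max? (d.getD attr pvInitA).2.1 (fun x => x) := by
    rw [h4]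
    cases hg : d.get? attr with
    | none =>
      rw [PySem.Dict.getD_of_not_contains _ _
        (by rw [PySem.Dict.contains_eq_isSome_get?, hg]; rfl)]
      rfl
    | some t => rw [PySem.Dict.getD_of_get?_eq_some _ _ hg]; rfl
  have hbase3 : st.2.2.2.get? attr = PySem.List.min? (d.getD attr pvInitA).2.2 (fun x => x) := by
    rw [h5]
    cases hg : d.get? attr with
    | none =>
      rw [PySem.Dict.getD_of_not_contains _ _
        (by rw [PySem.Dict.contains_eq_isSome_get?, hg]; rfl)]
      rfl
    | some t => rw [PySem.Dict.getD_of_get?_eq_some _ _ hg]; rfl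
  have hguard : ∀ k, k ≠ attr → (if st.2.1.contains attr then st.2.1 else
      st.2.1.insert attr PySem.Set.empty).get? k = st.2.1.get? k := by
    intro k hk
    split
    · rfl
    · exact PySem.Dict.get?_insert_of_ne _ _ hk
  -- the '>' running-max update matches appending v and taking max?
  have hgtmain :
      (if !st.2.2.1.contains attr || st.2.2.1.getD attr 0 < v then st.2.2.1.insert attr v
       else st.2.2.1).get? attr =
        some (match PySem.List.max? (d.getD attr pvInitA).2.1 (fun x => x) with
              | none => v | some m => if m < v then v else m) := by
    have hcontains : st.2.2.1.contains attr = (st.2.2.1.get? attr).isSome :=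
      PySem.Dict.contains_eq_isSome_get? ..
    rw [hbase2] at hcontains
    cases hm : PySem.List.max? (d.getD attr pvInitA).2.1 (fun x => x) with
    | none =>
      rw [hm] at hcontains
      simp [hcontains, PySem.Dict.get?_insert_self]
    | some m =>
      have hgd : st.2.2.1.getD attr 0 = m :=
        PySem.Dict.getD_of_get?_eq_some _ _ (by rw [hbase2, hm])
      rw [hm] at hcontains
      by_cases hlt : m < v
      · simp [hcontains, hgd, hlt, PySem.Dict.get?_insert_self]
      · simp [hcontains, hgd, hlt, hbase2, hm]
  have hlemain :
      (if !st.2.2.2.contains attr || v < st.2.2.2.getD attr 0 then st.2.2.2.insert attr v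
       else st.2.2.2).get? attr =
        some (match PySem.List.min? (d.getD attr pvInitA).2.2 (fun x => x) with
              | none => v | some m => if v < m then v else m) := by
    have hcontains : st.2.2.2.contains attr = (st.2.2.2.get? attr).isSome :=
      PySem.Dict.contains_eq_isSome_get? ..
    rw [hbase3] at hcontains
    cases hm : PySem.List.min? (d.getD attr pvInitA).2.2 (fun x => x) with
    | none =>
      rw [hm] at hcontains
      simp [hcontains, PySem.Dict.get?_insert_self]
    | some m =>
      have hgd : st.2.2.2.getD attr 0 = m :=
        PySem.Dict.getD_of_get?_eq_some _ _ (by rw [hbase3, hm])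
      rw [hm] at hcontains
      by_cases hlt : v < m
      · simp [hcontains, hgd, hlt, PySem.Dict.get?_insert_self]
      · simp [hcontains, hgd, hlt, hbase3, hm]
  by_cases hop1 : op = "="
  · subst hop1
    refine ⟨?_, hnodup, ?_, ?_, ?_⟩
    · simpa [pvStepB] using horder
    · intro k
      show ((if st.2.1.contains attr then st.2.1 else st.2.1.insert attr
          PySem.Set.empty).modify attr PySem.Set.empty (fun s => PySem.Set.add s v)).get? k = _
      by_cases hk : k = attr
      · subst hk
        rw [pv_stepA_get?_self, PySem.Dict.modify, PySem.Dict.get?_insert_self, hbase1]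
        simp [pvFA]
      · rw [pv_stepA_get?_ne d attr _ v k hk, PySem.Dict.modify,
          PySem.Dict.get?_insert_of_ne _ _ hk, hguard k hk, h3]
    · intro k
      show st.2.2.1.get? k = _
      by_cases hk : k = attr
      · subst hk
        rw [pv_stepA_get?_self, Option.bind_some]
        simpa [pvFA] using hbase2
      · rw [pv_stepA_get?_ne d attr _ v k hk, h4]
    · intro k
      show st.2.2.2.get? k = _
      by_cases hk : k = attr
      · subst hk
        rw [pv_stepA_get?_self, Option.bind_some]
        simpa [pvFA] using hbase3
      · rw [pv_stepA_get?_ne d attr _ v k hk, h5]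
  · by_cases hop2 : op = ">"
    · subst hop2
      refine ⟨?_, hnodup, ?_, ?_, ?_⟩
      · simpa [pvStepB] using horder
      · intro k
        show (if st.2.1.contains attr then st.2.1 else st.2.1.insert attr
            PySem.Set.empty).get? k = _
        by_cases hk : k = attr
        · subst hk
          rw [pv_stepA_get?_self, hgself]
          simp [pvFA]
        · rw [pv_stepA_get?_ne d attr _ v k hk, hguard k hk, h3]
      · intro k
        show (if !st.2.2.1.contains attr || st.2.2.1.getD attr 0 < v then
            st.2.2.1.insert attr v else st.2.2.1).get? k = _
        by_cases hk : k = attr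
        · subst hk
          rw [pv_stepA_get?_self, Option.bind_some, hgtmain]
          simp [pvFA, pv_max?_snoc]
        · rw [pv_stepA_get?_ne d attr _ v k hk, ← h4]
          split
          · exact PySem.Dict.get?_insert_of_ne _ _ hk
          · rfl
      · intro k
        show st.2.2.2.get? k = _
        by_cases hk : k = attr
        · subst hk
          rw [pv_stepA_get?_self, Option.bind_some]
          simpa [pvFA] using hbase3
        · rw [pv_stepA_get?_ne d attr _ v k hk, h5]
    · by_cases hop3 : op = "<="
      · subst hop3
        refine ⟨?_, hnodup, ?_, ?_, ?_⟩
        · simpa [pvStepB] using horder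
        · intro k
          show (if st.2.1.contains attr then st.2.1 else st.2.1.insert attr
              PySem.Set.empty).get? k = _
          by_cases hk : k = attr
          · subst hk
            rw [pv_stepA_get?_self, hgself]
            simp [pvFA]
          · rw [pv_stepA_get?_ne d attr _ v k hk, hguard k hk, h3]
        · intro k
          show st.2.2.1.get? k = _
          by_cases hk : k = attr
          · subst hk
            rw [pv_stepA_get?_self, Option.bind_some]
            simpa [pvFA] using hbase2
          · rw [pv_stepA_get?_ne d attr _ v k hk, h4]
        · intro k
          show (if !st.2.2.2.contains attr || v < st.2.2.2.getD attr 0 then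
              st.2.2.2.insert attr v else st.2.2.2).get? k = _
          by_cases hk : k = attr
          · subst hk
            rw [pv_stepA_get?_self, Option.bind_some, hlemain]
            simp [pvFA, pv_min?_snoc]
          · rw [pv_stepA_get?_ne d attr _ v k hk, ← h5]
            split
            · exact PySem.Dict.get?_insert_of_ne _ _ hk
            · rfl
      · refine ⟨?_, hnodup, ?_, ?_, ?_⟩
        · simpa [pvStepB, hop1, hop2, hop3] using horder
        · intro k
          have hred : (pvStepB st (attr, op, v)).2.1 =
              (if st.2.1.contains attr then st.2.1 else st.2.1.insert attr PySem.Set.empty) := by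
            simp [pvStepB, hop1, hop2, hop3]
          rw [hred]
          by_cases hk : k = attr
          · subst hk
            rw [pv_stepA_get?_self, hgself]
            simp [pvFA, hop1, hop2, hop3]
          · rw [pv_stepA_get?_ne d attr _ v k hk, hguard k hk, h3]
        · intro k
          have hred : (pvStepB st (attr, op, v)).2.2.1 = st.2.2.1 := by
            simp [pvStepB, hop1, hop2, hop3]
          rw [hred]
          by_cases hk : k = attr
          · subst hk
            rw [pv_stepA_get?_self, Option.bind_some]
            simpa [pvFA, hop1, hop2, hop3] using hbase2
          · rw [pv_stepA_get?_ne d attr _ v k hk, h4]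
        · intro k
          have hred : (pvStepB st (attr, op, v)).2.2.2 = st.2.2.2 := by
            simp [pvStepB, hop1, hop2, hop3]
          rw [hred]
          by_cases hk : k = attr
          · subst hk
            rw [pv_stepA_get?_self, Option.bind_some]
            simpa [pvFA, hop1, hop2, hop3] using hbase3
          · rw [pv_stepA_get?_ne d attr _ v k hk, h5]

theorem pv_rel_fold (rules : List (String × String × Int))
    (d : PySem.Dict String (PySem.Set Int × List Int × List Int))
    (st : List String × PySem.Dict String (PySem.Set Int) × PySem.Dict String Int × PySem.Dict String Int)
    (h : pvRel d st) : pvRel (rules.foldl pvStepA d) (rules.foldl pvStepB st) := by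
  induction rules generalizing d st with
  | nil => exact h
  | cons r rest ih => exact ih _ _ (pv_rel_step d st r h)

theorem pv_rel_empty : pvRel PySem.Dict.empty
    ([], PySem.Dict.empty, PySem.Dict.empty, PySem.Dict.empty) := by
  refine ⟨rfl, by simp [PySem.Dict.keys_empty], ?_, ?_, ?_⟩ <;> intro k <;> rfl

-- what one item of A's dict contributes to A's output
def pvOutA (it : String × (PySem.Set Int × List Int × List Int)) : List (String × String × Int) :=
  it.2.1.map (fun v => (it.1, "=", v))
  ++ (match PySem.List.max? it.2.2.1 (fun x => x) with | some m => [(it.1, ">", m)] | none => [])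
  ++ (match PySem.List.min? it.2.2.2 (fun x => x) with | some m => [(it.1, "<=", m)] | none => [])

theorem pv_emitA_eq : pvEmitA = fun acc it => acc ++ pvOutA it := by
  funext acc it
  simp only [pvEmitA, pvOutA, PySem.List.foldl_append_singleton_eq_map]
  cases PySem.List.max? it.2.2.1 (fun x => x) <;>
    cases PySem.List.min? it.2.2.2 (fun x => x) <;> simp

theorem pv_out_pointwise (d : PySem.Dict String (PySem.Set Int × List Int × List Int))
    (st : List String × PySem.Dict String (PySem.Set Int) × PySem.Dict String Int × PySem.Dict String Int)
    (h : pvRel d st) (k : String) :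
    (st.2.1.getD k PySem.Set.empty).map (fun v => (k, "=", v))
      ++ (if st.2.2.1.contains k then [(k, ">", st.2.2.1.getD k 0)] else [])
      ++ (if st.2.2.2.contains k then [(k, "<=", st.2.2.2.getD k 0)] else [])
      = pvOutA (k, d.getD k pvInitA) := by
  obtain ⟨h1, h2, h3, h4, h5⟩ := h
  have hgd : d.getD k pvInitA = (d.get? k).getD pvInitA := PySem.Dict.getD_eq_get?_getD ..
  have hceq : st.2.2.1.contains k = (st.2.2.1.get? k).isSome := PySem.Dict.contains_eq_isSome_get? ..
  have hcle : st.2.2.2.contains k = (st.2.2.2.get? k).isSome := PySem.Dict.contains_eq_isSome_get? ..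
  cases hg : d.get? k with
  | none =>
    have he : st.2.1.getD k PySem.Set.empty = PySem.Set.empty := by
      rw [PySem.Dict.getD_eq_get?_getD, h3, hg]; rfl
    rw [hceq, hcle, h4, h5, hg, hgd, hg]
    simp [pvOutA, pvInitA, PySem.List.max?, PySem.List.min?, PySem.Set.empty,
      PySem.Dict.getD_eq_get?_getD, h3, hg]
  | some t =>
    have he : st.2.1.getD k PySem.Set.empty = t.1 := by
      rw [PySem.Dict.getD_eq_get?_getD, h3, hg]; rfl
    rw [hgd, hg]
    simp only [Option.getD_some, pvOutA, he]
    congr 1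
    congr 1
    · rw [hceq, h4, hg]
      cases hm : PySem.List.max? t.2.1 (fun x => x) with
      | none => simp [hm]
      | some m =>
        have : st.2.2.1.getD k 0 = m :=
          PySem.Dict.getD_of_get?_eq_some _ _ (by simp [h4, hg, hm])
        simp [hm, this]
    · rw [hcle, h5, hg]
      cases hm : PySem.List.min? t.2.2 (fun x => x) with
      | none => simp [hm]
      | some m =>
        have : st.2.2.2.getD k 0 = m :=
          PySem.Dict.getD_of_get?_eq_some _ _ (by simp [h5, hg, hm])
        simp [hm, this]

-- ===== VERDICT (by name: the statement is the Claim_ definition above) =====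
theorem simplify_rule_spec : Claim_equal_simplify_rule := by
  intro rules _ _
  show simplify_rule rules = simplify_rule_alt rules
  have hrel := pv_rel_fold rules _ _ pv_rel_empty
  set d := rules.foldl pvStepA PySem.Dict.empty with hd
  set st := rules.foldl pvStepB ([], PySem.Dict.empty, PySem.Dict.empty, PySem.Dict.empty) with hst
  rw [simplify_rule, simplify_rule_alt]
  rw [← hd, ← hst]
  rw [PySem.Dict.items_eq_map_keys d hrel.2.1 pvInitA, pv_emitA_eq,
    PySem.List.foldl_append_eq_flatMap, List.flatMap_map, List.nil_append]
  rw [hrel.1]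
  exact (List.flatMap_congr (fun k _ => pv_out_pointwise d st hrel k)).symm
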